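-- pv_equiv track=rewrite | github.com/LWAlphaMonkey/programming-language | tourism2.py | check_satisfaction
-- ===== SOURCE A (Python) =====
-- class TOOLS:
--     def compare_number(self, satisfied_pair):
--         satisfied_num = -1
--         nonsatisfied_num = -1
--         for single in satisfied_pair:
--             if single[0] == True and single[1] > satisfied_num:
--                 satisfied_num = single[1]
--             if single[0] == False:
--                 if nonsatisfied_num == -1:
--                     nonsatisfied_num = single[1]
--                 else:
--                     if single[1] < nonsatisfied_num:
--                         nonsatisfied_num = single[1]
--
--         if nonsatisfied_num == -1:
--             ret = satisfied_num
--         else: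
--             ret = nonsatisfied_num
--
--         return ret
--
-- def check_satisfaction(tables, people):
--     full_satisfied = []
--     current_satisfied = 0
--     max_satisfied = 0
--
--     for table in tables:
--         full_satisfied = []
--         for person in people:
--             current_satisfied = 0
--             for prefer in people[person]:
--                 if prefer in table.values():
--                     current_satisfied += 1
--             if current_satisfied == len(people[person]):
--                 full_satisfied.append([True, current_satisfied])
--                 if current_satisfied > max_satisfied:
--                     max_satistied = current_satisfied
--             else:
--                 full_satisfied.append([False, current_satisfied])
--
--         num = TOOLS().compare_number(full_satisfied)
--         if num > max_satisfied:
--             max_satisfied = num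
--
--     return max_satisfied
-- ===== SOURCE B (Python) =====
-- def check_satisfaction(tables, people):
--     # Transposed traversal: one (best satisfied count, min unsatisfied count)
--     # accumulator per table, updated person by person; one final pass picks the answer.
--     val_sets = [set(t.values()) for t in tables]
--     acc = [(-1, None) for _ in val_sets]
--     for prefs in people.values():
--         n = len(prefs)
--         new_acc = []
--         for (best, mu), vals in zip(acc, val_sets):
--             cnt = sum(p in vals for p in prefs)
--             if cnt == n:
--                 new_acc.append((max(best, cnt), mu))
--             else:
--                 new_acc.append((best, cnt if mu is None else min(mu, cnt)))
--         acc = new_acc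
--     result = 0
--     for best, mu in acc:
--         result = max(result, best if mu is None else mu)
--     return result
-- ===== Notes on version B (the rewrite author's own statement) =====
-- stated objective: faster
-- what changed: Transposed the traversal: instead of A's table-outer loop that builds a [flag,count] list per table and rescans it with TOOLS.compare_number, B precomputes each table's value set once, keeps one (best_sat, min_unsat) accumulator per table updated person by person in a people-outer loop, and picks the answer in a single final pass.
import Mathlib
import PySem

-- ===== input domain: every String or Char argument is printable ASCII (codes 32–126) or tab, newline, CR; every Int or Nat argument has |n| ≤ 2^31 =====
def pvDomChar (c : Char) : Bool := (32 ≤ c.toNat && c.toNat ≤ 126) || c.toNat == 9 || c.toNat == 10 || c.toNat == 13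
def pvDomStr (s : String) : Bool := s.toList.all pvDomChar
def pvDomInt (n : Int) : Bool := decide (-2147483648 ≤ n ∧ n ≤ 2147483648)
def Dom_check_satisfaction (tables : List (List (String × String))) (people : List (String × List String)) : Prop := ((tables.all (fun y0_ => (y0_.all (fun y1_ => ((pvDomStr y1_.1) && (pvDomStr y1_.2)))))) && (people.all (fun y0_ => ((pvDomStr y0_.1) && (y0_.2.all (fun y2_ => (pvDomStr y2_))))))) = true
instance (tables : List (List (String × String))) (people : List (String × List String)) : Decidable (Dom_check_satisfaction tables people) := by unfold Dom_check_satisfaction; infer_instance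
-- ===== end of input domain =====

-- B transposes A's traversal (objective: alternative): instead of A's table-outer loop that
-- builds a [flag,count] list per table and rescans it with TOOLS.compare_number, B keeps one
-- (best_sat, min_unsat) accumulator per table, updates them person by person, then one final pass.

-- ===== PORT A =====
-- TOOLS().compare_number(satisfied_pair), transliterated: one fold carrying
-- (satisfied_num, nonsatisfied_num), then the trailing if.
def tools_compare_number (satisfied_pair : List (Bool × Int)) : Int :=
  let r := satisfied_pair.foldl (fun (acc : Int × Int) single =>
    (if single.1 = true ∧ single.2 > acc.1 then single.2 else acc.1,
     if single.1 = false then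
       (if acc.2 = -1 then single.2 else if single.2 < acc.2 then single.2 else acc.2)
     else acc.2)) (-1, -1)
  if r.2 = -1 then r.1 else r.2

-- 'for person in people: … people[person] …' iterates the dict's keys; on the deduped dict
-- the lookup people[person] is exactly the item's value, so we fold over the items.
-- The line 'max_satistied = current_satisfied' in A assigns a typo'd variable that is never
-- read; it has no effect on the result and leaves no trace in the state carried here.
def check_satisfaction (tables : List (List (String × String))) (people : List (String × List String)) : Int :=
  let peopleD := PySem.Dict.ofList people
  tables.foldl (fun max_satisfied table =>
    let tableD := PySem.Dict.ofList table
    let full_satisfied := peopleD.items.foldl (fun fs person =>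
      let current_satisfied := person.2.foldl
        (fun c prefer => if prefer ∈ tableD.values then c + 1 else c) (0 : Int)
      if current_satisfied = (person.2.length : Int) then fs ++ [(true, current_satisfied)]
      else fs ++ [(false, current_satisfied)]) ([] : List (Bool × Int))
    let num := tools_compare_number full_satisfied
    if num > max_satisfied then num else max_satisfied) 0

-- ===== PORT B =====
-- Source B: val_sets built once; a list of (best_sat, min_unsat) accumulators, one per table,
-- rebuilt ('new_acc') as each person is processed; final pass folds max over the scores.
def check_satisfaction_alt (tables : List (List (String × String))) (people : List (String × List String)) : Int :=
  let val_sets : List (PySem.Set String) :=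
    tables.map (fun t => PySem.Set.ofList (PySem.Dict.ofList t).values)
  let acc0 : List (Int × Option Int) := val_sets.map (fun _ => ((-1 : Int), (none : Option Int)))
  let acc := (PySem.Dict.ofList people).values.foldl
    (fun acc prefs =>
      let n : Int := (prefs.length : Int)
      (acc.zip val_sets).map (fun avt =>
        let cnt : Int := (prefs.countP (fun p => decide (p ∈ avt.2)) : Int)
        if cnt = n then (max avt.1.1 cnt, avt.1.2)
        else (avt.1.1, some (match avt.1.2 with | none => cnt | some m => min m cnt))))
    acc0
  acc.foldl (fun result bm =>
    max result (match bm.2 with | none => bm.1 | some m => m)) 0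

-- ===== PRECONDITION & SPEC =====
def Spec_check_satisfaction (tables : List (List (String × String))) (people : List (String × List String)) (out : Int) : Prop := out = check_satisfaction_alt tables people
instance (tables : List (List (String × String))) (people : List (String × List String)) (out : Int) : Decidable (Spec_check_satisfaction tables people out) := by unfold Spec_check_satisfaction; infer_instance

-- ===== CLAIM (what is proved, stated in full; the proofs are below) =====
def Claim_equal_check_satisfaction : Prop := ∀ (tables : List (List (String × String))) (people : List (String × List String)), Dom_check_satisfaction tables people → Spec_check_satisfaction tables people (check_satisfaction tables people)

-- ===== LEMMAS AND PROOFS =====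

-- zip of a map with its source, fused
lemma zip_map_self {α β γ : Type} (vs : List α) (f : α → β) (g : β × α → γ) :
    ((vs.map f).zip vs).map g = vs.map (fun v => g (f v, v)) := by
  induction vs with
  | nil => rfl
  | cons v t ih => simp [ih]

-- loop interchange: B's people-outer fold over a list of per-table accumulators
-- equals the map over tables of a per-table people fold.
lemma interchange {α β γ : Type} (step : γ → β → α → β) (ps : List α) (vs : List γ)
    (init : γ → β) :
    ps.foldl (fun acc a => (acc.zip vs).map (fun avt => step avt.2 avt.1 a)) (vs.map init)
    = vs.map (fun v => ps.foldl (fun b a => step v b a) (init v)) := by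
  induction ps generalizing init with
  | nil => rfl
  | cons a t ih =>
    simp only [List.foldl_cons]
    rw [zip_map_self vs init (fun avt => step avt.2 avt.1 a)]
    exact ih (fun v => step v (init v) a)

-- the folded-in count loop of A is B's countP over the value set
lemma count_loop_eq (vals : List String) (prefs : List String) :
    prefs.foldl (fun c prefer => if prefer ∈ vals then c + 1 else c) (0 : Int)
    = (prefs.countP (fun p => decide (p ∈ PySem.Set.ofList vals)) : Int) := by
  have h := PySem.List.foldl_count_if (fun p => decide (p ∈ vals)) prefs 0
  simp only [decide_eq_true_eq] at h
  rw [h]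
  simp [PySem.Set.mem_ofList]

-- invariant tying A's compare_number fold state (sat, nsat sentinel ints) to
-- B's per-table accumulator (best, mu : Option Int), for a nonnegative count function
lemma fold_pair_rel (ps : List (List String)) (c : List String → Int)
    (hc : ∀ x, 0 ≤ c x) (s nsat b : Int) (mu : Option Int)
    (h1 : s = b)
    (h2 : (nsat = -1 ∧ mu = none) ∨ (∃ m, mu = some m ∧ nsat = m ∧ 0 ≤ m)) :
    (let rA := ps.foldl (fun (acc : Int × Int) prefs =>
        (if decide (c prefs = (prefs.length : Int)) = true ∧ c prefs > acc.1
           then c prefs else acc.1,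
         if decide (c prefs = (prefs.length : Int)) = false then
           (if acc.2 = -1 then c prefs else if c prefs < acc.2 then c prefs else acc.2)
         else acc.2)) (s, nsat)
     let rB := ps.foldl (fun (bm : Int × Option Int) prefs =>
        if c prefs = (prefs.length : Int) then (max bm.1 (c prefs), bm.2)
        else (bm.1, some (match bm.2 with | none => c prefs | some m => min m (c prefs))))
        (b, mu)
     rA.1 = rB.1 ∧ ((rA.2 = -1 ∧ rB.2 = none) ∨ (∃ m, rB.2 = some m ∧ rA.2 = m ∧ 0 ≤ m))) := by
  induction ps generalizing s nsat b mu with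
  | nil => exact ⟨h1, h2⟩
  | cons prefs t ih =>
    simp only [List.foldl_cons]
    by_cases hsat : c prefs = (prefs.length : Int)
    · rw [if_pos hsat]
      apply ih
      · subst h1
        by_cases hgt : c prefs > s
        · rw [if_pos ⟨decide_eq_true hsat, hgt⟩, max_def]
          split_ifs <;> omega
        · rw [if_neg (fun h => hgt h.2), max_def]
          split_ifs <;> omega
      · rw [if_neg (show ¬ decide (c prefs = (prefs.length : Int)) = false by
          simp [hsat])]
        exact h2
    · rw [if_neg hsat]
      apply ih
      · rw [if_neg (show ¬ (decide (c prefs = (prefs.length : Int)) = true ∧ c prefs > s) by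
          simp [hsat])]
        exact h1
      · rw [if_pos (show decide (c prefs = (prefs.length : Int)) = false by simp [hsat])]
        rcases h2 with ⟨hn, hm⟩ | ⟨m, hm, hn, hm0⟩
        · subst hn; subst hm
          exact Or.inr ⟨c prefs, rfl, if_pos rfl, hc prefs⟩
        · refine Or.inr ⟨min m (c prefs), by subst hm; rfl, ?_, le_min hm0 (hc prefs)⟩
          rw [hn, if_neg (show (m : Int) ≠ -1 by omega), min_comm, min_def]
          split_ifs <;> omega

-- A's per-table pass (build full_satisfied, rescan with compare_number) equals
-- B's per-table accumulator fold followed by the mu/best selection.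
lemma per_table (ps : List (List String)) (c : List String → Int) (hc : ∀ x, 0 ≤ c x) :
    tools_compare_number
      (ps.map (fun prefs => (decide (c prefs = (prefs.length : Int)), c prefs)))
    = (let bm := ps.foldl (fun (bm : Int × Option Int) prefs =>
         if c prefs = (prefs.length : Int) then (max bm.1 (c prefs), bm.2)
         else (bm.1, some (match bm.2 with | none => c prefs | some m => min m (c prefs))))
         ((-1 : Int), (none : Option Int))
       match bm.2 with | none => bm.1 | some m => m) := by
  unfold tools_compare_number
  rw [List.foldl_map]
  have h := fold_pair_rel ps c hc (-1) (-1) (-1) none rfl (Or.inl ⟨rfl, rfl⟩)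
  simp only at h ⊢
  obtain ⟨h1, h2⟩ := h
  rcases h2 with ⟨hn, hm⟩ | ⟨m, hm, hn, hm0⟩
  · rw [hn, hm, if_pos rfl, h1]
  · rw [hm, hn, if_neg (by omega)]

-- A's full_satisfied accumulation is a map over the people items
lemma full_satisfied_eq_map (ps : List (String × List String)) (c : List String → Int) :
    ps.foldl (fun fs person =>
      if c person.2 = (person.2.length : Int) then fs ++ [(true, c person.2)]
      else fs ++ [(false, c person.2)]) ([] : List (Bool × Int))
    = ps.map (fun p => (decide (c p.2 = (p.2.length : Int)), c p.2)) := by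
  have hmap := PySem.List.foldl_append_singleton_eq_map
    (fun p : String × List String => (decide (c p.2 = (p.2.length : Int)), c p.2)) ps []
  rw [List.nil_append] at hmap
  rw [← hmap]
  apply PySem.List.foldl_congr_mem
  intro fs p _
  split_ifs with h <;> simp [h]

-- ===== VERDICT (by name: the statement is the Claim_ definition above) =====
theorem check_satisfaction_spec : Claim_equal_check_satisfaction := by
  intro tables people _
  show check_satisfaction tables people = check_satisfaction_alt tables people
  simp only [check_satisfaction, check_satisfaction_alt]
  -- reshape B: interchange the loops, then fuse the two maps into the tables fold
  rw [interchange
      (fun (v : PySem.Set String) (bm : Int × Option Int) (prefs : List String) =>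
        if (prefs.countP (fun p => decide (p ∈ v)) : Int) = (prefs.length : Int)
        then (max bm.1 ((prefs.countP (fun p => decide (p ∈ v)) : Int)), bm.2)
        else (bm.1, some (match bm.2 with
          | none => ((prefs.countP (fun p => decide (p ∈ v)) : Int))
          | some m => min m ((prefs.countP (fun p => decide (p ∈ v)) : Int)))))
      (PySem.Dict.ofList people).values
      (tables.map (fun t => PySem.Set.ofList (PySem.Dict.ofList t).values))
      (fun _ => ((-1 : Int), (none : Option Int)))]
  rw [List.map_map, List.foldl_map]
  -- now both sides are folds over `tables`; compare the step functions pointwise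
  apply PySem.List.foldl_congr_mem
  intro acc table _
  simp only [Function.comp_def]
  set c : List String → Int := fun prefs =>
    (prefs.countP (fun p =>
      decide (p ∈ PySem.Set.ofList (PySem.Dict.ofList table).values)) : Int) with hcdef
  have hcnt : ∀ (p : String × List String) (fs : List (Bool × Int)),
      p ∈ (PySem.Dict.ofList people).items →
      (if p.2.foldl (fun cc prefer =>
          if prefer ∈ (PySem.Dict.ofList table).values then cc + 1 else cc) (0 : Int)
          = (p.2.length : Int)
       then fs ++ [(true, p.2.foldl (fun cc prefer =>
          if prefer ∈ (PySem.Dict.ofList table).values then cc + 1 else cc) (0 : Int))]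
       else fs ++ [(false, p.2.foldl (fun cc prefer =>
          if prefer ∈ (PySem.Dict.ofList table).values then cc + 1 else cc) (0 : Int))])
      = (if c p.2 = (p.2.length : Int) then fs ++ [(true, c p.2)]
         else fs ++ [(false, c p.2)]) := by
    intro p fs _
    rw [count_loop_eq]
  have hA : ((PySem.Dict.ofList people).items.foldl (fun fs person =>
        if person.2.foldl (fun cc prefer =>
            if prefer ∈ (PySem.Dict.ofList table).values then cc + 1 else cc) (0 : Int)
            = (person.2.length : Int)
        then fs ++ [(true, person.2.foldl (fun cc prefer =>
            if prefer ∈ (PySem.Dict.ofList table).values then cc + 1 else cc) (0 : Int))]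
        else fs ++ [(false, person.2.foldl (fun cc prefer =>
            if prefer ∈ (PySem.Dict.ofList table).values then cc + 1 else cc) (0 : Int))])
        ([] : List (Bool × Int)))
      = (PySem.Dict.ofList people).items.map
          (fun p => (decide (c p.2 = (p.2.length : Int)), c p.2)) := by
    rw [← full_satisfied_eq_map (PySem.Dict.ofList people).items c]
    apply PySem.List.foldl_congr_mem
    intro fs p hp
    exact hcnt p fs hp
  rw [hA]
  have hvals : (PySem.Dict.ofList people).values
      = (PySem.Dict.ofList people).items.map (·.2) := rfl
  have hmm : (PySem.Dict.ofList people).items.map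
        (fun p => (decide (c p.2 = (p.2.length : Int)), c p.2))
      = ((PySem.Dict.ofList people).items.map (·.2)).map
          (fun prefs => (decide (c prefs = (prefs.length : Int)), c prefs)) := by
    rw [List.map_map]
    rfl
  rw [hmm, ← hvals, per_table _ c (fun x => by positivity)]
  simp only [hvals, List.foldl_map, hcdef]
  rw [max_def]
  split_ifs <;> omega
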